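-- pv_equiv track=rewrite | github.com/jame2546/Comprog | 08_Dict/08_Dict_22.py | Topsales
-- ===== SOURCE A (Python) =====
-- def Topsales(ice_cream_sales) :
--     tmp = []
--     for k,v in ice_cream_sales.items() :
--         tmp.append([v,k])
--     tmp.sort()
--     Top = [tmp[0][1]]
--     for t in tmp :
--         if t[0] == tmp[0][0] and t[1] != tmp[0][1] :
--             Top.append(t[1])
--     return sorted(Top)
-- ===== SOURCE B (Python) =====
-- def Topsales(ice_cream_sales):
--     min_val = min(ice_cream_sales.values())
--     return sorted(k for k, v in ice_cream_sales.items() if v == min_val)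
-- ===== Notes on version B (the rewrite author's own statement) =====
-- stated objective: faster
-- what changed: B replaces A's full lexicographic sort of all [value,key] pairs plus a re-scan with a single min() pass over the values and one sorted() over only the minimum-value keys.
import Mathlib
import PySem

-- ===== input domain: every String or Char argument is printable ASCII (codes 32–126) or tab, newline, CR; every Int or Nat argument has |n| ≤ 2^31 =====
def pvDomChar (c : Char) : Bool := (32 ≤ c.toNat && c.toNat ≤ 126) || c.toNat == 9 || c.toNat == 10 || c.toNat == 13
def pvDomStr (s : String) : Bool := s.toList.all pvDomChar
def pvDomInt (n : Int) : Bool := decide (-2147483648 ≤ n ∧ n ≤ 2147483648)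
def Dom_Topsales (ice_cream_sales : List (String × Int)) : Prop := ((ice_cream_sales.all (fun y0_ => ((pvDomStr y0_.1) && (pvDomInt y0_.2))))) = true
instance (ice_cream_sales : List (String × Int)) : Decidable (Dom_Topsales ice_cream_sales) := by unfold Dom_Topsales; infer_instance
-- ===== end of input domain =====

-- B computes min(values) once and sorts only the minimum-value keys, instead of A's
-- full sort of all [value,key] pairs followed by a re-scan.

-- ===== PORT A =====
-- the String×Int association list models the Python dict argument; both ports pass it
-- through PySem.Dict.ofList, exactly as dict construction deduplicates keys.
def Topsales (ice_cream_sales : List (String × Int)) : List String :=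
  let d := PySem.Dict.ofList ice_cream_sales
  -- tmp = []; for k,v in d.items(): tmp.append([v,k])
  let tmp := d.items.foldl (fun acc p => acc ++ [(p.2, p.1)]) ([] : List (Int × String))
  -- tmp.sort()  (lexicographic on [v,k])
  let tmpS := PySem.List.sorted2 tmp (fun t => t.1) (fun t => t.2)
  match tmpS with
  | [] => []  -- Python raises IndexError at tmp[0]; excluded by Pre_Topsales
  | t0 :: _ =>
    -- Top = [tmp[0][1]]; for t in tmp: if t[0]==tmp[0][0] and t[1]!=tmp[0][1]: Top.append(t[1])
    let top := tmpS.foldl (fun acc t => if t.1 == t0.1 && t.2 != t0.2 then acc ++ [t.2] else acc) [t0.2]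
    PySem.List.sorted top (fun k => k)

-- ===== PORT B =====
def Topsales_alt (ice_cream_sales : List (String × Int)) : List String :=
  let d := PySem.Dict.ofList ice_cream_sales
  match PySem.List.min? d.values (fun v => v) with
  | none => []  -- Python raises ValueError (min of empty); excluded by Pre_Topsales
  | some m =>
    PySem.List.sorted ((d.items.filter (fun p => p.2 == m)).map (fun p => p.1)) (fun k => k)

-- ===== PRECONDITION & SPEC =====
-- A raises (IndexError at tmp[0]) on the empty dict; Pre_ excludes only the empty list.
def Pre_Topsales (ice_cream_sales : List (String × Int)) : Prop := ice_cream_sales ≠ []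
instance (ice_cream_sales : List (String × Int)) : Decidable (Pre_Topsales ice_cream_sales) := by unfold Pre_Topsales; infer_instance
def pvWitness_Topsales : (List (String × Int)) := [("a", 2), ("b", 1), ("c", 1)]

def Spec_Topsales (ice_cream_sales : List (String × Int)) (out : List String) : Prop := out = Topsales_alt ice_cream_sales
instance (ice_cream_sales : List (String × Int)) (out : List String) : Decidable (Spec_Topsales ice_cream_sales out) := by unfold Spec_Topsales; infer_instance

-- ===== CLAIM (what is proved, stated in full; the proofs are below) =====
def Claim_equal_Topsales : Prop := ∀ (ice_cream_sales : List (String × Int)), Dom_Topsales ice_cream_sales → Pre_Topsales ice_cream_sales → Spec_Topsales ice_cream_sales (Topsales ice_cream_sales)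

-- ===== LEMMAS AND PROOFS =====

theorem pv_items_insert_len {κ ν : Type} [BEq κ] (d : PySem.Dict κ ν) (k : κ) (v : ν) :
    d.items.length ≤ (d.insert k v).items.length := by
  unfold PySem.Dict.insert
  split <;> simp

theorem pv_items_update_len {κ ν : Type} [BEq κ] (ps : List (κ × ν)) (d : PySem.Dict κ ν) :
    d.items.length ≤ (d.update ps).items.length := by
  induction ps generalizing d with
  | nil => simp [PySem.Dict.update]
  | cons p rest ih =>
      unfold PySem.Dict.update at *
      simp only [List.foldl_cons]
      exact le_trans (pv_items_insert_len d p.1 p.2) (ih _)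

theorem pv_items_ofList_ne_nil {κ ν : Type} [BEq κ] (xs : List (κ × ν)) (h : xs ≠ []) :
    (PySem.Dict.ofList xs).items ≠ [] := by
  cases xs with
  | nil => exact absurd rfl h
  | cons x rest =>
      have h1 : (PySem.Dict.empty.insert x.1 x.2 : PySem.Dict κ ν).items.length = 1 := by
        unfold PySem.Dict.insert
        simp [PySem.Dict.empty]
      have := pv_items_update_len rest (PySem.Dict.empty.insert x.1 x.2 : PySem.Dict κ ν)
      rw [h1] at this
      have : (PySem.Dict.ofList (x :: rest)).items.length ≥ 1 := by
        unfold PySem.Dict.ofList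
        unfold PySem.Dict.update at *
        simpa using this
      intro hnil
      rw [hnil] at this
      simp at this

theorem pv_insertBy_pairwise {α : Type} (bf : α → α → Bool) (R : α → α → Prop)
    (hxy : ∀ a b, bf a b = true → R a b) (hnx : ∀ a b, bf a b = false → R b a)
    (htr : ∀ a b c, R a b → R b c → R a c)
    (x : α) (ys : List α) (hp : ys.Pairwise R) :
    (PySem.List.insertBy bf x ys).Pairwise R := by
  induction ys with
  | nil => simp [PySem.List.insertBy]
  | cons y t ih =>
      rw [PySem.List.insertBy.eq_2]
      rcases List.pairwise_cons.mp hp with ⟨hyt, hpt⟩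
      by_cases hb : bf x y = true
      · simp only [hb, if_true]
        refine List.pairwise_cons.mpr ⟨?_, hp⟩
        intro z hz
        rcases List.mem_cons.mp hz with rfl | hz
        · exact hxy _ _ hb
        · exact htr _ _ _ (hxy _ _ hb) (hyt z hz)
      · rw [if_neg hb]
        refine List.pairwise_cons.mpr ⟨?_, ih hpt⟩
        intro z hz
        rcases (PySem.List.mem_insertBy bf x z t).mp hz with rfl | hz
        · exact hnx _ _ (by simpa using hb)
        · exact hyt z hz

theorem pv_foldl_insertBy_pairwise {α : Type} (bf : α → α → Bool) (R : α → α → Prop)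
    (hxy : ∀ a b, bf a b = true → R a b) (hnx : ∀ a b, bf a b = false → R b a)
    (htr : ∀ a b c, R a b → R b c → R a c)
    (xs acc : List α) (hp : acc.Pairwise R) :
    (xs.foldl (fun acc x => PySem.List.insertBy bf x acc) acc).Pairwise R := by
  induction xs generalizing acc with
  | nil => simpa
  | cons x t ih =>
      simp only [List.foldl_cons]
      exact ih _ (pv_insertBy_pairwise bf R hxy hnx htr x acc hp)

def pvLe (a b : Int × String) : Prop := a.1 < b.1 ∨ (a.1 = b.1 ∧ a.2 ≤ b.2)

theorem pv_sorted2_pairwise (xs : List (Int × String)) :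
    (PySem.List.sorted2 xs (fun t => t.1) (fun t => t.2)).Pairwise pvLe := by
  unfold PySem.List.sorted2
  simp only [if_neg (by decide : ¬ (false = true))]
  apply pv_foldl_insertBy_pairwise
  · intro a b h
    simp only [Bool.or_eq_true, Bool.and_eq_true, Bool.not_eq_true', decide_eq_true_eq,
      decide_eq_false_iff_not] at h
    rcases h with h | ⟨h1, h2⟩
    · exact Or.inl h
    · rcases lt_or_eq_of_le (not_lt.mp h1) with hlt | heq
      · exact Or.inl hlt
      · exact Or.inr ⟨heq, le_of_lt h2⟩
  · intro a b h
    have h' : ¬ a.1 < b.1 ∧ ((!decide (b.1 < a.1)) = false ∨ ¬ a.2 < b.2) := by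
      simpa only [Bool.or_eq_false_iff, Bool.and_eq_false_iff, decide_eq_false_iff_not] using h
    obtain ⟨h1, h2⟩ := h'
    rcases lt_or_eq_of_le (not_lt.mp h1) with hlt | heq
    · exact Or.inl hlt
    · refine Or.inr ⟨heq, ?_⟩
      rcases h2 with h2 | h2
      · exfalso
        rw [Bool.not_eq_false', decide_eq_true_eq, heq] at h2
        exact lt_irrefl _ h2
      · exact not_lt.mp h2
  · intro a b c hab hbc
    rcases hab with h | ⟨h1, h2⟩ <;> rcases hbc with g | ⟨g1, g2⟩
    · exact Or.inl (lt_trans h g)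
    · exact Or.inl (g1 ▸ h)
    · exact Or.inl (h1 ▸ g)
    · exact Or.inr ⟨h1.trans g1, le_trans h2 g2⟩
  · exact List.Pairwise.nil

theorem pv_filter_perm_cons (l : List (String × Int)) (hnd : (l.map Prod.fst).Nodup)
    (e : String × Int) (he : e ∈ l) (p : String × Int → Bool) (hpe : p e = true) :
    (l.filter p).Perm (e :: l.filter (fun x => p x && x.1 != e.1)) := by
  induction l with
  | nil => simp at he
  | cons a rest ih =>
      simp only [List.map_cons, List.nodup_cons, List.mem_map] at hnd
      obtain ⟨ha, hndr⟩ := hnd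
      rcases List.mem_cons.mp he with rfl | her
      · -- e = a
        have : rest.filter (fun x => p x && x.1 != e.1) = rest.filter p := by
          apply List.filter_congr
          intro x hx
          have : x.1 ≠ e.1 := fun hh => ha ⟨x, hx, hh⟩
          simp [this]
        simp only [List.filter_cons, hpe, if_pos, bne_self_eq_false, Bool.and_false]
        rw [this]
        simp [hpe]
      · -- e ∈ rest
        have hane : a.1 ≠ e.1 := fun hh => ha ⟨e, her, hh.symm⟩
        have ihp := ih hndr her
        by_cases hpa : p a = true
        · have hq : List.filter (fun x => p x && x.1 != e.1) (a :: rest)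
              = a :: List.filter (fun x => p x && x.1 != e.1) rest := by
            simp only [List.filter_cons]
            simp [hpa, hane]
          rw [List.filter_cons_of_pos hpa, hq]
          exact (ihp.cons a).trans (List.Perm.swap e a _)
        · have hpa' : p a = false := by simpa using hpa
          have hq : List.filter (fun x => p x && x.1 != e.1) (a :: rest)
              = List.filter (fun x => p x && x.1 != e.1) rest := by
            simp only [List.filter_cons]
            simp [hpa']
          rw [List.filter_cons_of_neg (by simp [hpa']), hq]
          exact ihp

-- ===== VERDICT (by name: the statement is the Claim_ definition above) =====
theorem Topsales_spec : Claim_equal_Topsales := by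
  intro xs _hdom hpre
  unfold Spec_Topsales
  have hitems : (PySem.Dict.ofList xs).items ≠ [] := pv_items_ofList_ne_nil xs hpre
  have hnd : ((PySem.Dict.ofList xs).items.map Prod.fst).Nodup := by
    have := PySem.Dict.nodup_keys_ofList (ps := xs)
    simpa [PySem.Dict.keys] using this
  simp only [Topsales, Topsales_alt]
  set its := (PySem.Dict.ofList xs).items with hits
  have hflat : ∀ (l : List (String × Int)), l.foldl (fun acc p => acc ++ [(p.2, p.1)]) [] = l.map (fun p => (p.2, p.1)) := by
    intro l
    rw [PySem.List.foldl_append_eq_flatMap]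
    induction l with
    | nil => rfl
    | cons a t ih => simp [List.flatMap] at ih ⊢; exact ih
  rw [hflat its]
  set tmp := its.map (fun p => (p.2, p.1)) with htmp
  have hperm : (PySem.List.sorted2 tmp (fun t => t.1) (fun t => t.2)).Perm tmp :=
    PySem.List.sorted2_perm tmp _ _ false
  have hSne : PySem.List.sorted2 tmp (fun t => t.1) (fun t => t.2) ≠ [] := by
    intro h
    rw [h] at hperm
    exact hitems (by simpa [htmp, List.map_eq_nil_iff] using hperm.nil_eq.symm)
  obtain ⟨t0, rest, hS⟩ : ∃ t0 rest, PySem.List.sorted2 tmp (fun t => t.1) (fun t => t.2) = t0 :: rest := by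
    cases h : PySem.List.sorted2 tmp (fun t => t.1) (fun t => t.2) with
    | nil => exact absurd h hSne
    | cons a b => exact ⟨a, b, rfl⟩
  have hvals : (PySem.Dict.ofList xs).values = its.map Prod.snd := by
    simp [PySem.Dict.values, hits]
  have hvne : (PySem.Dict.ofList xs).values ≠ [] := by
    rw [hvals]; simpa [List.map_eq_nil_iff] using hitems
  obtain ⟨m, hm⟩ : ∃ m, PySem.List.min? (PySem.Dict.ofList xs).values (fun v => v) = some m := by
    cases h : PySem.List.min? (PySem.Dict.ofList xs).values (fun v => v) with
    | none => exact absurd ((PySem.List.min?_eq_none_iff _ _).mp h) hvne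
    | some m => exact ⟨m, rfl⟩
  -- identify the head of the sorted pair list
  have ht0mem : t0 ∈ tmp := hperm.subset (by rw [hS]; exact List.mem_cons_self)
  obtain ⟨p0, hp0, hp0e⟩ := List.mem_map.mp ht0mem
  -- minimality of the head's value
  have hpw := pv_sorted2_pairwise tmp
  rw [hS] at hpw
  have hmin1 : ∀ y ∈ tmp, t0.1 ≤ y.1 := by
    intro y hy
    have : y ∈ t0 :: rest := hS ▸ hperm.mem_iff.mpr hy
    rcases List.mem_cons.mp this with rfl | hyr
    · exact le_refl _
    · rcases (List.pairwise_cons.mp hpw).1 y hyr with h | ⟨h, _⟩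
      · exact le_of_lt h
      · exact le_of_eq h
  have htmpsnd : tmp.map Prod.fst = its.map Prod.snd := by
    rw [htmp, List.map_map]; rfl
  have hmle : m ≤ t0.1 := by
    refine PySem.List.min?_isMin hm t0.1 ?_
    rw [hvals, ← htmpsnd]
    exact List.mem_map.mpr ⟨t0, ht0mem, rfl⟩
  have hlem : t0.1 ≤ m := by
    have := PySem.List.min?_mem hm
    rw [hvals, ← htmpsnd] at this
    obtain ⟨y, hy, hye⟩ := List.mem_map.mp this
    exact hye ▸ hmin1 y hy
  have hmt0 : m = t0.1 := le_antisymm hmle hlem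
  subst hmt0
  obtain rfl : t0 = (p0.2, p0.1) := hp0e.symm
  rw [hS, hm]
  show PySem.List.sorted
      (List.foldl (fun acc t => if (t.1 == (p0.2, p0.1).1 && t.2 != (p0.2, p0.1).2) = true then acc ++ [t.2] else acc)
        [(p0.2, p0.1).2] ((p0.2, p0.1) :: rest)) (fun k => k)
    = PySem.List.sorted (List.map (fun p => p.1) (List.filter (fun p => p.2 == (p0.2, p0.1).1) its)) (fun k => k)
  simp only []
  -- A's accumulation loop is cons-plus-filter-map
  have e1 : List.foldl (fun (acc : List String) (t : Int × String) => if (t.1 == p0.2 && t.2 != p0.1) = true then acc ++ [t.2] else acc)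
      [p0.1] ((p0.2, p0.1) :: rest)
      = [p0.1] ++ (((p0.2, p0.1) :: rest).filter (fun (t : Int × String) => t.1 == p0.2 && t.2 != p0.1)).map (fun (t : Int × String) => t.2) :=
    PySem.List.foldl_append_if (fun (t : Int × String) => t.1 == p0.2 && t.2 != p0.1) (fun (t : Int × String) => t.2) _ _
  rw [e1]
  -- B's filtered list: pull the unique key p0 out front
  have hpe : (fun (x : String × Int) => x.2 == p0.2) p0 = true := by simp
  have hfp := pv_filter_perm_cons its hnd p0 hp0 (fun (x : String × Int) => x.2 == p0.2) hpe
  -- both sides are sorts of permutation-equal lists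
  refine PySem.List.sorted_eq_sorted_of_perm _ _ (fun k => k) (fun a b h => h) ?_
  refine List.Perm.trans ?_ ((hfp.map Prod.fst).symm)
  simp only [List.map_cons, List.singleton_append]
  refine List.Perm.cons p0.1 ?_
  have hfq : (((p0.2, p0.1) :: rest).filter (fun t => t.1 == p0.2 && t.2 != p0.1)).Perm
      (tmp.filter (fun t => t.1 == p0.2 && t.2 != p0.1)) := by
    rw [← hS]
    exact hperm.filter _
  refine List.Perm.trans (hfq.map _) ?_
  rw [htmp, List.filter_map, List.map_map]
  exact List.Perm.of_eq rfl
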